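-- pv_equiv track=rewrite | github.com/ArvashV/trustcheck-agent | trustcheck_agent/analyzer.py | _is_probably_asset_url
-- ===== SOURCE A (Python) =====
-- def _is_probably_asset_url(u: str) -> bool:
--     lowered = u.lower()
--     return any(
--         lowered.endswith(ext)
--         for ext in (
--             ".png", ".jpg", ".jpeg", ".gif", ".webp", ".svg", ".ico",
--             ".css", ".js", ".json", ".xml", ".pdf", ".zip",
--             ".woff", ".woff2", ".ttf", ".eot",
--         )
--     )
-- ===== SOURCE B (Python) =====
-- _ASSET_EXTS = frozenset((
--     "png", "jpg", "jpeg", "gif", "webp", "svg", "ico",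
--     "css", "js", "json", "xml", "pdf", "zip",
--     "woff", "woff2", "ttf", "eot",
-- ))
--
--
-- def _is_probably_asset_url(u: str) -> bool:
--     _head, sep, tail = u.lower().rpartition(".")
--     return sep == "." and tail in _ASSET_EXTS
-- ===== Notes on version B (the rewrite author's own statement) =====
-- stated objective: idiomatic
-- what changed: Instead of looping over 17 extensions and calling endswith for each, B extracts the segment after the last dot once (rpartition) and does a single membership test in a frozenset of dot-less extensions.
import Mathlib
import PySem

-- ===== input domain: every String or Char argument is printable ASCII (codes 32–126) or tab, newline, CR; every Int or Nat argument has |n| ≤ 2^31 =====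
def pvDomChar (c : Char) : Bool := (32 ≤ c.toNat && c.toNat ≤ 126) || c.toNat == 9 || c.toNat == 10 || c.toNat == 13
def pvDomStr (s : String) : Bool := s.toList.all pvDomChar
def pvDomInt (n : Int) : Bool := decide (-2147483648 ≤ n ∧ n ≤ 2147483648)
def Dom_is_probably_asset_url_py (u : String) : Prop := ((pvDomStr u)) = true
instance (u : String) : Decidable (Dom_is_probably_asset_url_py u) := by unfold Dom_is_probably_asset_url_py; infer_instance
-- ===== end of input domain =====

-- B extracts the segment after the last dot once and tests it against a set of dot-less extensions,
-- instead of A's loop of 17 endswith scans; proved to return the same Bool on every string.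


-- ===== PORT A =====
def is_probably_asset_url_py (u : String) : Bool :=
  let lowered := PySem.Str.lower u
  [".png", ".jpg", ".jpeg", ".gif", ".webp", ".svg", ".ico",
   ".css", ".js", ".json", ".xml", ".pdf", ".zip",
   ".woff", ".woff2", ".ttf", ".eot"].any
    (fun ext => PySem.Str.endswith lowered ext)

-- ===== PORT B =====
def pvAssetExts : List (List Char) :=
  ["png".toList, "jpg".toList, "jpeg".toList, "gif".toList, "webp".toList, "svg".toList,
   "ico".toList, "css".toList, "js".toList, "json".toList, "xml".toList, "pdf".toList,
   "zip".toList, "woff".toList, "woff2".toList, "ttf".toList, "eot".toList]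

def is_probably_asset_url_py_alt (u : String) : Bool :=
  let lowered := PySem.Str.lower u
  -- hand port of lowered.rpartition(".") (head is unused by Source B, so only sep/tail are built):
  -- exact — tail is the segment after the LAST '.', sep is "." iff a '.' occurs in lowered
  let r := lowered.toList.reverse
  let t := r.takeWhile (fun c => !(c == '.'))
  let sep : List Char := if t.length = r.length then [] else ['.']
  let tail := t.reverse
  sep == ['.'] && pvAssetExts.contains tail

-- ===== PRECONDITION & SPEC =====
def Spec_is_probably_asset_url_py (u : String) (out : Bool) : Prop := out = is_probably_asset_url_py_alt u
instance (u : String) (out : Bool) : Decidable (Spec_is_probably_asset_url_py u out) := by unfold Spec_is_probably_asset_url_py; infer_instance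

-- ===== CLAIM (what is proved, stated in full; the proofs are below) =====
def Claim_equal_is_probably_asset_url_py : Prop := ∀ (u : String), Dom_is_probably_asset_url_py u → Spec_is_probably_asset_url_py u (is_probably_asset_url_py u)

-- ===== LEMMAS AND PROOFS =====

-- ('.'-free e followed by '.') is a prefix of r  ↔  the dot-free head of r is exactly e and r has a dot
theorem pv_prefix_dot (e r : List Char) (he : '.' ∉ e) :
    (e ++ ['.']) <+: r ↔ (r.takeWhile (fun c => !(c == '.')) = e ∧ '.' ∈ r) := by
  induction e generalizing r with
  | nil =>
    cases r with
    | nil => simp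
    | cons c t =>
      by_cases hc : c = '.'
      · subst hc; simp
      · simp [hc, List.cons_prefix_cons, Ne.symm hc]
  | cons a e' ih =>
    have ha : a ≠ '.' := fun h => he (h ▸ List.mem_cons_self)
    have he' : '.' ∉ e' := fun h => he (List.mem_cons_of_mem _ h)
    cases r with
    | nil => simp
    | cons c t =>
      constructor
      · intro h
        rw [List.cons_append, List.cons_prefix_cons] at h
        obtain ⟨rfl, h2⟩ := h
        have hih := (ih t he').1 h2
        simp [ha, hih.1, hih.2]
      · intro ⟨h1, h2⟩
        by_cases hc : c = '.'
        · subst hc; simp at h1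
        · simp only [List.takeWhile_cons, hc, Bool.not_eq_true', beq_eq_false_iff_ne, ne_eq,
            not_false_iff, if_true] at h1
          rw [List.cons_eq_cons] at h1
          obtain ⟨rfl, h1'⟩ := h1
          have h2' : '.' ∈ t := by
            rcases List.mem_cons.1 h2 with h | h
            · exact absurd h.symm hc
            · exact h
          rw [List.cons_append, List.cons_prefix_cons]
          exact ⟨rfl, (ih t he').2 ⟨h1', h2'⟩⟩

-- the suffix test for a concrete extension ('.'::xs, xs dot-free), read on the reversed string
theorem pv_endswith_iff (l : List Char) (xs : List Char) (hx : '.' ∉ xs) :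
    ('.' :: xs) <:+ l ↔
      (l.reverse.takeWhile (fun c => !(c == '.')) = xs.reverse ∧ '.' ∈ l.reverse) := by
  rw [← List.reverse_prefix]
  have h : ('.' :: xs).reverse = xs.reverse ++ ['.'] := by simp
  rw [h, pv_prefix_dot _ _ (by simpa using hx)]

-- B's "sep == '.'" condition is exactly "the string contains a dot"
theorem pv_sep (r : List Char) :
    ((if (r.takeWhile (fun c => !(c == '.'))).length = r.length then ([] : List Char) else ['.'])
      == ['.']) = decide ('.' ∈ r) := by
  by_cases hmem : '.' ∈ r
  · have hne : (r.takeWhile (fun c => !(c == '.'))).length ≠ r.length := by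
      intro hlen
      have heq : r.takeWhile (fun c => !(c == '.')) = r :=
        (List.takeWhile_prefix _).eq_of_length hlen
      have := List.takeWhile_eq_self_iff.1 heq '.' hmem
      simp at this
    simp [hne, hmem]
  · have heq : r.takeWhile (fun c => !(c == '.')) = r :=
      List.takeWhile_eq_self_iff.2 (fun a hA => by
        simp only [Bool.not_eq_true', beq_eq_false_iff_ne]
        exact fun hEq => hmem (hEq ▸ hA))
    simp [heq, hmem]

-- the endswith loop over dotted extensions equals dot-presence plus one membership test of the tail
theorem pv_main (l : List Char) (ds : List (List Char)) (hd : ∀ e ∈ ds, '.' ∉ e) :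
    (ds.any (fun xs => PySem.Chars.endswith l ('.' :: xs)))
      = (decide ('.' ∈ l.reverse)
          && ds.contains (l.reverse.takeWhile (fun c => !(c == '.'))).reverse) := by
  induction ds with
  | nil => simp
  | cons d ds ih =>
    have hd1 : '.' ∉ d := hd d List.mem_cons_self
    have hrest : ∀ e ∈ ds, '.' ∉ e := fun e he => hd e (List.mem_cons_of_mem _ he)
    rw [List.any_cons, ih hrest, List.contains_cons, Bool.and_or_distrib_left]
    have hhead : PySem.Chars.endswith l ('.' :: d)
        = (decide ('.' ∈ l.reverse)
            && ((l.reverse.takeWhile (fun c => !(c == '.'))).reverse == d)) := by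
      rw [Bool.eq_iff_iff]
      simp only [PySem.Chars.endswith_iff, pv_endswith_iff l d hd1, Bool.and_eq_true,
        decide_eq_true_eq, beq_iff_eq, List.reverse_eq_iff]
      tauto
    rw [hhead]

theorem is_probably_asset_url_py_eq (u : String) :
    is_probably_asset_url_py u = is_probably_asset_url_py_alt u := by
  have hmap : ([".png", ".jpg", ".jpeg", ".gif", ".webp", ".svg", ".ico",
      ".css", ".js", ".json", ".xml", ".pdf", ".zip",
      ".woff", ".woff2", ".ttf", ".eot"] : List String)
      = pvAssetExts.map (fun xs => String.ofList ('.' :: xs)) := by decide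
  have hdotfree : ∀ e ∈ pvAssetExts, '.' ∉ e := by decide
  unfold is_probably_asset_url_py is_probably_asset_url_py_alt
  rw [hmap, List.any_map]
  simp only [Function.comp_def, PySem.Str.endswith_eq, String.toList_ofList]
  rw [pv_main _ pvAssetExts hdotfree]
  rw [pv_sep]

-- ===== VERDICT (by name: the statement is the Claim_ definition above) =====
theorem is_probably_asset_url_py_spec : Claim_equal_is_probably_asset_url_py := by
  intro u _
  exact is_probably_asset_url_py_eq u
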